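-- pv_equiv track=rewrite | github.com/tarunyadav/DifferentialML | GIFT_COFB.py | rowperm_new
-- ===== SOURCE A (Python) =====
-- def rowperm_new(S, off_bit):
--     T=0x00000000;
--     for b in range(0,4):
--         T |= ((S>>(8*b+0))&0x1)<<(off_bit[b]  + 4*0);
--         T |= ((S>>(8*b+1))&0x1)<<(off_bit[b]  + 4*1);
--         T |= ((S>>(8*b+2))&0x1)<<(off_bit[b]  + 4*2);
--         T |= ((S>>(8*b+3))&0x1)<<(off_bit[b]  + 4*3);
--         T |= ((S>>(8*b+4))&0x1)<<(off_bit[b]  + 4*4);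
--         T |= ((S>>(8*b+5))&0x1)<<(off_bit[b]  + 4*5);
--         T |= ((S>>(8*b+6))&0x1)<<(off_bit[b]  + 4*6);
--         T |= ((S>>(8*b+7))&0x1)<<(off_bit[b]  + 4*7);
--     return(T);
-- ===== SOURCE B (Python) =====
-- def _spread8(x):
--     # spread the 8 low bits of x to stride-4 positions 0,4,8,...,28
--     x = (x | (x << 12)) & 0x000F000F
--     x = (x | (x << 6)) & 0x03030303
--     x = (x | (x << 3)) & 0x11111111
--     return x
--
-- def rowperm_new(S, off_bit):
--     T = 0
--     for b in range(0, 4):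
--         T |= _spread8((S >> (8 * b)) & 0xFF) << off_bit[b]
--     return T
-- ===== Notes on version B (the rewrite author's own statement) =====
-- stated objective: alternative
-- what changed: B replaces A's 8 per-bit extract/mask/shift/OR steps per byte by a single SWAR bit-spread (three shift/or/mask rounds spreading the byte's 8 bits to stride-4 positions) followed by one shift and one OR.
-- outside the precondition, e.g. on rowperm_new(1, [0, 1, 2]): A raises IndexError, B raises IndexError; on rowperm_new(1, [-1, 0, 0, 0]): A raises ValueError, B raises ValueError
import Mathlib
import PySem

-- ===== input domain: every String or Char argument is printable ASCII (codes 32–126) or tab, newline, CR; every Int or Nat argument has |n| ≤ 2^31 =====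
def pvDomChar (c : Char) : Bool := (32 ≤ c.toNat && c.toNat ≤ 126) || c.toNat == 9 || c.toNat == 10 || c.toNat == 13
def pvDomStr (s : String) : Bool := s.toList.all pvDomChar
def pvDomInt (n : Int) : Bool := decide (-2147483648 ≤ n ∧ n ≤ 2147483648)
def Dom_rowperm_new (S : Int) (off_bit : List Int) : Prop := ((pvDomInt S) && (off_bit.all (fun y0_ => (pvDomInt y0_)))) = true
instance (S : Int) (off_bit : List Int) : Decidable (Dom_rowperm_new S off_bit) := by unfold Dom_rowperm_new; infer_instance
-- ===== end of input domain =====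

-- B replaces the 8 per-bit extract/shift/OR steps of each byte by one SWAR bit-spread
-- (three shift/or/mask rounds) followed by a single shift; same return value on Pre_.

-- ===== PORT A =====
def rowperm_new (S : Int) (off_bit : List Int) : Int :=
  (PySem.List.pyRange 0 4 1).foldl (fun T b =>
    let off := PySem.List.pyGetD off_bit b 0
    let T := PySem.Int.bor T ((PySem.Int.band (S >>> (8*b+0).toNat) 1) <<< (off + 4*0).toNat)
    let T := PySem.Int.bor T ((PySem.Int.band (S >>> (8*b+1).toNat) 1) <<< (off + 4*1).toNat)
    let T := PySem.Int.bor T ((PySem.Int.band (S >>> (8*b+2).toNat) 1) <<< (off + 4*2).toNat)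
    let T := PySem.Int.bor T ((PySem.Int.band (S >>> (8*b+3).toNat) 1) <<< (off + 4*3).toNat)
    let T := PySem.Int.bor T ((PySem.Int.band (S >>> (8*b+4).toNat) 1) <<< (off + 4*4).toNat)
    let T := PySem.Int.bor T ((PySem.Int.band (S >>> (8*b+5).toNat) 1) <<< (off + 4*5).toNat)
    let T := PySem.Int.bor T ((PySem.Int.band (S >>> (8*b+6).toNat) 1) <<< (off + 4*6).toNat)
    let T := PySem.Int.bor T ((PySem.Int.band (S >>> (8*b+7).toNat) 1) <<< (off + 4*7).toNat)
    T) 0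

-- ===== PORT B =====
-- Source B's helper _spread8: three shift/or/mask rounds spreading the 8 low bits to stride 4
def spread8 (x : Int) : Int :=
  let x1 := PySem.Int.band (PySem.Int.bor x (x <<< 12)) 0x000F000F
  let x2 := PySem.Int.band (PySem.Int.bor x1 (x1 <<< 6)) 0x03030303
  PySem.Int.band (PySem.Int.bor x2 (x2 <<< 3)) 0x11111111

def rowperm_new_alt (S : Int) (off_bit : List Int) : Int :=
  (PySem.List.pyRange 0 4 1).foldl (fun T b =>
    PySem.Int.bor T
      (spread8 (PySem.Int.band (S >>> (8*b).toNat) 255) <<< (PySem.List.pyGetD off_bit b 0).toNat)) 0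

-- ===== PRECONDITION & SPEC =====
-- Pre_ excludes exactly the inputs where Python A raises: IndexError when len(off_bit) < 4,
-- ValueError (negative shift count) when one of the four used offsets is negative.
def Pre_rowperm_new (S : Int) (off_bit : List Int) : Prop :=
  4 ≤ off_bit.length ∧ ∀ x ∈ off_bit.take 4, 0 ≤ x
instance (S : Int) (off_bit : List Int) : Decidable (Pre_rowperm_new S off_bit) := by unfold Pre_rowperm_new; infer_instance
def pvWitness_rowperm_new : Int × List Int := (305419896, [0, 1, 2, 3])

def Spec_rowperm_new (S : Int) (off_bit : List Int) (out : Int) : Prop := out = rowperm_new_alt S off_bit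
instance (S : Int) (off_bit : List Int) (out : Int) : Decidable (Spec_rowperm_new S off_bit out) := by unfold Spec_rowperm_new; infer_instance

-- ===== CLAIM (what is proved, stated in full; the proofs are below) =====
def Claim_equal_rowperm_new : Prop := ∀ (S : Int) (off_bit : List Int), Dom_rowperm_new S off_bit → Pre_rowperm_new S off_bit → Spec_rowperm_new S off_bit (rowperm_new S off_bit)

-- ===== LEMMAS AND PROOFS =====

theorem shl_nonneg (a : Int) (n : Nat) (h : 0 ≤ a) : 0 ≤ a <<< n := by
  rw [Int.shiftLeft_eq]; positivity

theorem bor_nonneg (a b : Int) (ha : 0 ≤ a) (hb : 0 ≤ b) : 0 ≤ PySem.Int.bor a b := by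
  rw [PySem.Int.bor_of_nonneg ha hb]; positivity

theorem band_nonneg_right (a b : Int) (hb : 0 ≤ b) : 0 ≤ PySem.Int.band a b := by
  rw [PySem.Int.band_comm]; exact PySem.Int.band_nonneg_of_nonneg_left a hb

theorem spread8_nonneg (x : Int) : 0 ≤ spread8 x := by
  unfold spread8; exact band_nonneg_right _ _ (by norm_num)

-- Python's  z & 255  is the low byte, i.e. z mod 256 (also for negative z)
theorem band255 (z : Int) : PySem.Int.band z 255 = z % 256 := by
  unfold PySem.Int.band
  split_ifs with h1 h2 h3
  · rw [show ((255:Int).toNat) = 2^8-1 from rfl, Nat.and_two_pow_sub_one_eq_mod]; omega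
  · norm_num at h2
  · rw [show ((255:Int).toNat) = 2^8-1 from rfl, Nat.and_comm, Nat.and_two_pow_sub_one_eq_mod]; omega
  · norm_num at h3

-- bit j < 8 of z is bit j of the low byte
theorem bit_low (z : Int) (j : Nat) (hj : j < 8) :
    PySem.Int.band ((z % 256) >>> j) 1 = PySem.Int.band (z >>> j) 1 := by
  rw [PySem.Int.band_one, PySem.Int.band_one,
      PySem.Int.mod_eq_emod_of_pos (by norm_num), PySem.Int.mod_eq_emod_of_pos (by norm_num),
      Int.shiftRight_eq_div_pow, Int.shiftRight_eq_div_pow]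
  interval_cases j <;> push_cast <;> omega

theorem bit_low0 (z : Int) : PySem.Int.band (z % 256) 1 = PySem.Int.band z 1 := by
  rw [PySem.Int.band_one, PySem.Int.band_one,
      PySem.Int.mod_eq_emod_of_pos (by norm_num), PySem.Int.mod_eq_emod_of_pos (by norm_num)]
  omega

-- the SWAR spread equals the eight per-bit placements, for every byte value
set_option maxRecDepth 10000 in
theorem spread_eq : ∀ n : Fin 256, spread8 ((n : Nat) : Int) =
    PySem.Int.bor (PySem.Int.bor (PySem.Int.bor (PySem.Int.bor (PySem.Int.bor (PySem.Int.bor (PySem.Int.bor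
      (PySem.Int.band ((n : Nat) : Int) 1)
      (PySem.Int.band (((n : Nat) : Int) >>> (1:Nat)) 1 <<< (4:Nat)))
      (PySem.Int.band (((n : Nat) : Int) >>> (2:Nat)) 1 <<< (8:Nat)))
      (PySem.Int.band (((n : Nat) : Int) >>> (3:Nat)) 1 <<< (12:Nat)))
      (PySem.Int.band (((n : Nat) : Int) >>> (4:Nat)) 1 <<< (16:Nat)))
      (PySem.Int.band (((n : Nat) : Int) >>> (5:Nat)) 1 <<< (20:Nat)))
      (PySem.Int.band (((n : Nat) : Int) >>> (6:Nat)) 1 <<< (24:Nat)))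
      (PySem.Int.band (((n : Nat) : Int) >>> (7:Nat)) 1 <<< (28:Nat)) := by decide

theorem cast_shl (m : Nat) (n : Nat) : ((m : Int) <<< n) = ((m <<< n : Nat) : Int) := rfl

-- OR-ing eight N-shifted nonnegative words one by one equals OR-ing them first, then shifting
theorem bor_shl_chain (T v0 v1 v2 v3 v4 v5 v6 v7 : Int) (N : Nat)
    (hT : 0 ≤ T) (h0 : 0 ≤ v0) (h1 : 0 ≤ v1) (h2 : 0 ≤ v2) (h3 : 0 ≤ v3)
    (h4 : 0 ≤ v4) (h5 : 0 ≤ v5) (h6 : 0 ≤ v6) (h7 : 0 ≤ v7) :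
    PySem.Int.bor (PySem.Int.bor (PySem.Int.bor (PySem.Int.bor (PySem.Int.bor (PySem.Int.bor (PySem.Int.bor (PySem.Int.bor
      T (v0 <<< N)) (v1 <<< N)) (v2 <<< N)) (v3 <<< N)) (v4 <<< N)) (v5 <<< N)) (v6 <<< N)) (v7 <<< N)
    = PySem.Int.bor T
        ((PySem.Int.bor (PySem.Int.bor (PySem.Int.bor (PySem.Int.bor (PySem.Int.bor (PySem.Int.bor (PySem.Int.bor
          v0 v1) v2) v3) v4) v5) v6) v7) <<< N) := by
  rw [← Int.toNat_of_nonneg hT, ← Int.toNat_of_nonneg h0, ← Int.toNat_of_nonneg h1,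
      ← Int.toNat_of_nonneg h2, ← Int.toNat_of_nonneg h3, ← Int.toNat_of_nonneg h4,
      ← Int.toNat_of_nonneg h5, ← Int.toNat_of_nonneg h6, ← Int.toNat_of_nonneg h7]
  simp only [cast_shl, PySem.Int.bor_natCast, Nat.cast_inj]
  simp [Nat.shiftLeft_or_distrib, Nat.or_assoc]

-- one byte of A's loop body equals B's spread-and-shift term
theorem byte_chunk (T z off : Int) (hT : 0 ≤ T) (hoff : 0 ≤ off) :
    PySem.Int.bor (PySem.Int.bor (PySem.Int.bor (PySem.Int.bor (PySem.Int.bor (PySem.Int.bor (PySem.Int.bor (PySem.Int.bor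
      T ((PySem.Int.band z 1) <<< (off + 4*0).toNat))
      ((PySem.Int.band (z >>> (1:Nat)) 1) <<< (off + 4*1).toNat))
      ((PySem.Int.band (z >>> (2:Nat)) 1) <<< (off + 4*2).toNat))
      ((PySem.Int.band (z >>> (3:Nat)) 1) <<< (off + 4*3).toNat))
      ((PySem.Int.band (z >>> (4:Nat)) 1) <<< (off + 4*4).toNat))
      ((PySem.Int.band (z >>> (5:Nat)) 1) <<< (off + 4*5).toNat))
      ((PySem.Int.band (z >>> (6:Nat)) 1) <<< (off + 4*6).toNat))
      ((PySem.Int.band (z >>> (7:Nat)) 1) <<< (off + 4*7).toNat)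
    = PySem.Int.bor T (spread8 (PySem.Int.band z 255) <<< off.toNat) := by
  rw [band255]
  rw [← bit_low0 z, ← bit_low z 1 (by norm_num), ← bit_low z 2 (by norm_num),
      ← bit_low z 3 (by norm_num), ← bit_low z 4 (by norm_num), ← bit_low z 5 (by norm_num),
      ← bit_low z 6 (by norm_num), ← bit_low z 7 (by norm_num)]
  have hx0 : 0 ≤ z % 256 := Int.emod_nonneg z (by norm_num)
  have hx256 : z % 256 < 256 := Int.emod_lt_of_pos z (by norm_num)
  have hN0 : (off + 4*0).toNat = off.toNat := by omega
  have hN1 : (off + 4*1).toNat = 4 + off.toNat := by omega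
  have hN2 : (off + 4*2).toNat = 8 + off.toNat := by omega
  have hN3 : (off + 4*3).toNat = 12 + off.toNat := by omega
  have hN4 : (off + 4*4).toNat = 16 + off.toNat := by omega
  have hN5 : (off + 4*5).toNat = 20 + off.toNat := by omega
  have hN6 : (off + 4*6).toNat = 24 + off.toNat := by omega
  have hN7 : (off + 4*7).toNat = 28 + off.toNat := by omega
  rw [hN0, hN1, hN2, hN3, hN4, hN5, hN6, hN7]
  simp only [Int.shiftLeft_add]
  have hbit : ∀ j : Nat, 0 ≤ PySem.Int.band ((z % 256) >>> j) 1 :=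
    fun j => band_nonneg_right _ _ (by norm_num)
  rw [bor_shl_chain T _ _ _ _ _ _ _ _ off.toNat hT
      (band_nonneg_right _ _ (by norm_num))
      (shl_nonneg _ _ (hbit 1)) (shl_nonneg _ _ (hbit 2)) (shl_nonneg _ _ (hbit 3))
      (shl_nonneg _ _ (hbit 4)) (shl_nonneg _ _ (hbit 5)) (shl_nonneg _ _ (hbit 6))
      (shl_nonneg _ _ (hbit 7))]
  have hs := spread_eq ⟨(z % 256).toNat, by omega⟩
  simp only [Int.toNat_of_nonneg hx0] at hs
  rw [← hs]

theorem take4_shape (l : List Int) (h : 4 ≤ l.length) :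
    ∃ a b c d t, l = a :: b :: c :: d :: t := by
  match l, h with
  | a :: b :: c :: d :: t, _ => exact ⟨a, b, c, d, t, rfl⟩

-- ===== VERDICT (by name: the statement is the Claim_ definition above) =====
theorem rowperm_new_spec : Claim_equal_rowperm_new := by
  intro S off_bit _ hpre
  obtain ⟨hlen, hpos⟩ := hpre
  obtain ⟨o0, o1, o2, o3, rest, rfl⟩ := take4_shape off_bit (by simpa using hlen)
  simp only [List.take, List.mem_cons, forall_eq_or_imp] at hpos
  obtain ⟨h0, h1, h2, h3, -⟩ := hpos
  show rowperm_new S _ = rowperm_new_alt S _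
  unfold rowperm_new rowperm_new_alt
  rw [show PySem.List.pyRange 0 4 1 = [0,1,2,3] from by decide]
  simp only [List.foldl]
  have g0 : PySem.List.pyGetD (o0::o1::o2::o3::rest) (0:Int) 0 = o0 := by simp [pysem]
  have g1 : PySem.List.pyGetD (o0::o1::o2::o3::rest) (1:Int) 0 = o1 := by simp [pysem]
  have g2 : PySem.List.pyGetD (o0::o1::o2::o3::rest) (2:Int) 0 = o2 := by simp [pysem]
  have g3 : PySem.List.pyGetD (o0::o1::o2::o3::rest) (3:Int) 0 = o3 := by simp [pysem]
  rw [g0, g1, g2, g3]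
  rw [show ((8*(0:Int)+0).toNat) = (0:Nat) from by decide]
  rw [show ((8*(0:Int)+1).toNat) = (1:Nat) from by decide]
  rw [show ((8*(0:Int)+2).toNat) = (2:Nat) from by decide]
  rw [show ((8*(0:Int)+3).toNat) = (3:Nat) from by decide]
  rw [show ((8*(0:Int)+4).toNat) = (4:Nat) from by decide]
  rw [show ((8*(0:Int)+5).toNat) = (5:Nat) from by decide]
  rw [show ((8*(0:Int)+6).toNat) = (6:Nat) from by decide]
  rw [show ((8*(0:Int)+7).toNat) = (7:Nat) from by decide]
  rw [show ((8*(0:Int)).toNat) = (0:Nat) from by decide]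
  rw [show ((8*(1:Int)+0).toNat) = (8:Nat) from by decide]
  rw [show ((8*(1:Int)+1).toNat) = (9:Nat) from by decide]
  rw [show ((8*(1:Int)+2).toNat) = (10:Nat) from by decide]
  rw [show ((8*(1:Int)+3).toNat) = (11:Nat) from by decide]
  rw [show ((8*(1:Int)+4).toNat) = (12:Nat) from by decide]
  rw [show ((8*(1:Int)+5).toNat) = (13:Nat) from by decide]
  rw [show ((8*(1:Int)+6).toNat) = (14:Nat) from by decide]
  rw [show ((8*(1:Int)+7).toNat) = (15:Nat) from by decide]
  rw [show ((8*(1:Int)).toNat) = (8:Nat) from by decide]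
  rw [show ((8*(2:Int)+0).toNat) = (16:Nat) from by decide]
  rw [show ((8*(2:Int)+1).toNat) = (17:Nat) from by decide]
  rw [show ((8*(2:Int)+2).toNat) = (18:Nat) from by decide]
  rw [show ((8*(2:Int)+3).toNat) = (19:Nat) from by decide]
  rw [show ((8*(2:Int)+4).toNat) = (20:Nat) from by decide]
  rw [show ((8*(2:Int)+5).toNat) = (21:Nat) from by decide]
  rw [show ((8*(2:Int)+6).toNat) = (22:Nat) from by decide]
  rw [show ((8*(2:Int)+7).toNat) = (23:Nat) from by decide]
  rw [show ((8*(2:Int)).toNat) = (16:Nat) from by decide]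
  rw [show ((8*(3:Int)+0).toNat) = (24:Nat) from by decide]
  rw [show ((8*(3:Int)+1).toNat) = (25:Nat) from by decide]
  rw [show ((8*(3:Int)+2).toNat) = (26:Nat) from by decide]
  rw [show ((8*(3:Int)+3).toNat) = (27:Nat) from by decide]
  rw [show ((8*(3:Int)+4).toNat) = (28:Nat) from by decide]
  rw [show ((8*(3:Int)+5).toNat) = (29:Nat) from by decide]
  rw [show ((8*(3:Int)+6).toNat) = (30:Nat) from by decide]
  rw [show ((8*(3:Int)+7).toNat) = (31:Nat) from by decide]
  rw [show ((8*(3:Int)).toNat) = (24:Nat) from by decide]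
  rw [Int.shiftRight_zero]
  rw [show S >>> (9:Nat) = (S >>> (8:Nat)) >>> (1:Nat) from by rw [show (9:Nat) = 8+1 from rfl, Int.shiftRight_add]]
  rw [show S >>> (10:Nat) = (S >>> (8:Nat)) >>> (2:Nat) from by rw [show (10:Nat) = 8+2 from rfl, Int.shiftRight_add]]
  rw [show S >>> (11:Nat) = (S >>> (8:Nat)) >>> (3:Nat) from by rw [show (11:Nat) = 8+3 from rfl, Int.shiftRight_add]]
  rw [show S >>> (12:Nat) = (S >>> (8:Nat)) >>> (4:Nat) from by rw [show (12:Nat) = 8+4 from rfl, Int.shiftRight_add]]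
  rw [show S >>> (13:Nat) = (S >>> (8:Nat)) >>> (5:Nat) from by rw [show (13:Nat) = 8+5 from rfl, Int.shiftRight_add]]
  rw [show S >>> (14:Nat) = (S >>> (8:Nat)) >>> (6:Nat) from by rw [show (14:Nat) = 8+6 from rfl, Int.shiftRight_add]]
  rw [show S >>> (15:Nat) = (S >>> (8:Nat)) >>> (7:Nat) from by rw [show (15:Nat) = 8+7 from rfl, Int.shiftRight_add]]
  rw [show S >>> (17:Nat) = (S >>> (16:Nat)) >>> (1:Nat) from by rw [show (17:Nat) = 16+1 from rfl, Int.shiftRight_add]]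
  rw [show S >>> (18:Nat) = (S >>> (16:Nat)) >>> (2:Nat) from by rw [show (18:Nat) = 16+2 from rfl, Int.shiftRight_add]]
  rw [show S >>> (19:Nat) = (S >>> (16:Nat)) >>> (3:Nat) from by rw [show (19:Nat) = 16+3 from rfl, Int.shiftRight_add]]
  rw [show S >>> (20:Nat) = (S >>> (16:Nat)) >>> (4:Nat) from by rw [show (20:Nat) = 16+4 from rfl, Int.shiftRight_add]]
  rw [show S >>> (21:Nat) = (S >>> (16:Nat)) >>> (5:Nat) from by rw [show (21:Nat) = 16+5 from rfl, Int.shiftRight_add]]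
  rw [show S >>> (22:Nat) = (S >>> (16:Nat)) >>> (6:Nat) from by rw [show (22:Nat) = 16+6 from rfl, Int.shiftRight_add]]
  rw [show S >>> (23:Nat) = (S >>> (16:Nat)) >>> (7:Nat) from by rw [show (23:Nat) = 16+7 from rfl, Int.shiftRight_add]]
  rw [show S >>> (25:Nat) = (S >>> (24:Nat)) >>> (1:Nat) from by rw [show (25:Nat) = 24+1 from rfl, Int.shiftRight_add]]
  rw [show S >>> (26:Nat) = (S >>> (24:Nat)) >>> (2:Nat) from by rw [show (26:Nat) = 24+2 from rfl, Int.shiftRight_add]]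
  rw [show S >>> (27:Nat) = (S >>> (24:Nat)) >>> (3:Nat) from by rw [show (27:Nat) = 24+3 from rfl, Int.shiftRight_add]]
  rw [show S >>> (28:Nat) = (S >>> (24:Nat)) >>> (4:Nat) from by rw [show (28:Nat) = 24+4 from rfl, Int.shiftRight_add]]
  rw [show S >>> (29:Nat) = (S >>> (24:Nat)) >>> (5:Nat) from by rw [show (29:Nat) = 24+5 from rfl, Int.shiftRight_add]]
  rw [show S >>> (30:Nat) = (S >>> (24:Nat)) >>> (6:Nat) from by rw [show (30:Nat) = 24+6 from rfl, Int.shiftRight_add]]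
  rw [show S >>> (31:Nat) = (S >>> (24:Nat)) >>> (7:Nat) from by rw [show (31:Nat) = 24+7 from rfl, Int.shiftRight_add]]
  have T1 : 0 ≤ PySem.Int.bor 0 (spread8 (PySem.Int.band S 255) <<< o0.toNat) :=
    bor_nonneg _ _ (by norm_num) (shl_nonneg _ _ (spread8_nonneg _))
  have T2 : 0 ≤ PySem.Int.bor (PySem.Int.bor 0 (spread8 (PySem.Int.band S 255) <<< o0.toNat)) (spread8 (PySem.Int.band (S >>> (8:Nat)) 255) <<< o1.toNat) :=
    bor_nonneg _ _ T1 (shl_nonneg _ _ (spread8_nonneg _))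
  have T3 : 0 ≤ PySem.Int.bor (PySem.Int.bor (PySem.Int.bor 0 (spread8 (PySem.Int.band S 255) <<< o0.toNat)) (spread8 (PySem.Int.band (S >>> (8:Nat)) 255) <<< o1.toNat)) (spread8 (PySem.Int.band (S >>> (16:Nat)) 255) <<< o2.toNat) :=
    bor_nonneg _ _ T2 (shl_nonneg _ _ (spread8_nonneg _))
  rw [byte_chunk _ S o0 (by norm_num) h0,
      byte_chunk _ (S >>> (8:Nat)) o1 T1 h1,
      byte_chunk _ (S >>> (16:Nat)) o2 T2 h2,
      byte_chunk _ (S >>> (24:Nat)) o3 T3 h3]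
  simp only [Int.shiftRight_natCast_right, Int.shiftRight_zero]
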